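-- pv_equiv track=rewrite | github.com/iagafoshin/dsa-faculty-service | scripts/analyze_fixtures.py | _render_frequency
-- ===== SOURCE A (Python) =====
-- from collections import Counter, defaultdict
--
-- SECTION_LABELS = [
--     "Публикации",
--     "Достижения и поощрения",
--     "Награды",
--     "Гранты",
--     "Патенты",
--     "Руководство студенческими работами",
--     "Редакционный состав",
--     "Опыт работы",
--     "Конференции",
--     "Доклады на конференциях",
--     "Преподавание",
--     "Образование",
--     "Повышение квалификации",
--     "Членство в диссертационных советах",
--     "Области научных интересов",
--     "Биография",
--     "Публичные выступления",
--     "Экспертиза",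
-- ]
--
-- def _render_frequency(rows: list[dict]) -> str:
--     total = len(rows)
--     freq = Counter()
--     for r in rows:
--         for label, v in r["presence"].items():
--             if v:
--                 freq[label] += 1
--     lines = []
--     for label in SECTION_LABELS:
--         n = freq[label]
--         pct = round(n * 100 / total) if total else 0
--         lines.append(f"- **{label}** — {n}/{total} fixtures ({pct}%)")
--     return "\n".join(lines)
-- ===== SOURCE B (Python) =====
-- _LABELS = (
--     "Публикации",
--     "Достижения и поощрения",
--     "Награды",
--     "Гранты",
--     "Патенты",
--     "Руководство студенческими работами",
--     "Редакционный состав",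
--     "Опыт работы",
--     "Конференции",
--     "Доклады на конференциях",
--     "Преподавание",
--     "Образование",
--     "Повышение квалификации",
--     "Членство в диссертационных советах",
--     "Области научных интересов",
--     "Биография",
--     "Публичные выступления",
--     "Экспертиза",
-- )
--
--
-- def _render_frequency(rows: list[dict]) -> str:
--     total = len(rows)
--     out = ""
--     for label in _LABELS:
--         n = sum(1 for r in rows if r["presence"].get(label))
--         pct = round(n * 100 / total) if total else 0
--         line = "- **%s** — %d/%d fixtures (%d%%)" % (label, n, total, pct)
--         out = line if not out else out + "\n" + line
--     return out
-- ===== Notes on version B (the rewrite author's own statement) =====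
-- stated objective: simpler
-- what changed: B drops A's Counter index and its lines list: one label-driven pass counts each label's rows inline with sum(1 for ...) and accumulates the output string directly, instead of A's row-driven counting pass followed by a separate formatting pass joined at the end.
import Mathlib
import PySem

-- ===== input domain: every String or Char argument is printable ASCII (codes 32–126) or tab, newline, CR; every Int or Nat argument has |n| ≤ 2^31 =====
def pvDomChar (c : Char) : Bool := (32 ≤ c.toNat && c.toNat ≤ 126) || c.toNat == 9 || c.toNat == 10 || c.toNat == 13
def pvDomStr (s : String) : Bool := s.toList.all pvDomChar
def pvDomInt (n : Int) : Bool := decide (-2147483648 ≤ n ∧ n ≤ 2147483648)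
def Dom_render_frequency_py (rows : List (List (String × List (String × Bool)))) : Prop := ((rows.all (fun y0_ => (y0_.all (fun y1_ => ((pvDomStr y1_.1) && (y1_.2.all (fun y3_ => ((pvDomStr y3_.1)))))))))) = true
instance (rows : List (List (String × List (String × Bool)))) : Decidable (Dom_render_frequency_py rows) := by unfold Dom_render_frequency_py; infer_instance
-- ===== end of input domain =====

-- B drops A's Counter index: one label-driven pass counts each label's rows inline while
-- formatting and accumulates the output string directly (objective: simpler). Return value only.

-- ===== PORT A =====
-- A-side helpers (used only by port A).

-- pct = round(n * 100 / total) if total else 0, ported by hand as exact rational round-half-to-even: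
-- exact because at a tie 100*n/total is a half-integer, which the float division returns exactly
-- (total is a list length, far below the 2^46 margin where double rounding could move a result).
def pvPctA (n total : Int) : Int :=
  if total = 0 then 0
  else
    let q := PySem.Int.floordiv (n * 100) total
    let r := PySem.Int.mod (n * 100) total
    if 2 * r < total then q
    else if total < 2 * r then q + 1
    else if PySem.Int.mod q 2 = 0 then q else q + 1

-- f"- **{label}** — {n}/{total} fixtures ({pct}%)"
def pvLineA (label : String) (n total : Int) : String :=
  PySem.Str.join "" ["- **", label, "** — ", PySem.Int.toStr n, "/", PySem.Int.toStr total,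
                     " fixtures (", PySem.Int.toStr (pvPctA n total), "%)"]

-- r["presence"] as a dict (the getD default is never reached under Pre_, which rules out the KeyError)
def pvPresenceA (r : List (String × List (String × Bool))) : PySem.Dict String Bool :=
  PySem.Dict.ofList ((PySem.Dict.ofList r).getD "presence" [])

def pvSectionLabelsA : List String :=
  ["Публикации", "Достижения и поощрения", "Награды", "Гранты", "Патенты",
   "Руководство студенческими работами", "Редакционный состав", "Опыт работы",
   "Конференции", "Доклады на конференциях", "Преподавание", "Образование",
   "Повышение квалификации", "Членство в диссертационных советах",
   "Области научных интересов", "Биография", "Публичные выступления", "Экспертиза"]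

def render_frequency_py (rows : List (List (String × List (String × Bool)))) : String :=
  let total : Int := rows.length
  let freq : PySem.Dict String Int :=
    rows.foldl
      (fun (freq : PySem.Dict String Int) r =>
        (pvPresenceA r).items.foldl
          (fun (freq : PySem.Dict String Int) lv =>
            if lv.2 then freq.modify lv.1 0 (· + 1) else freq)
          freq)
      PySem.Dict.empty
  let lines : List String :=
    pvSectionLabelsA.foldl
      (fun (lines : List String) label => lines ++ [pvLineA label (freq.getD label 0) total]) []
  PySem.Str.join "\n" lines

-- ===== PORT B =====
-- B-side helpers (used only by port B).

-- round(x) for x = num/den, den ≠ 0, by hand: nearest integer, ties to even (exact here for the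
-- same reason as on the A side: at a tie num/den is a half-integer the float division hits exactly).
def pvRoundB (num den : Int) : Int :=
  let q := PySem.Int.floordiv num den
  let r := num - q * den
  if den < 2 * r ∨ (2 * r = den ∧ PySem.Int.mod q 2 ≠ 0) then q + 1 else q

def pvLabelsB : List String :=
  ["Публикации", "Достижения и поощрения", "Награды", "Гранты", "Патенты",
   "Руководство студенческими работами", "Редакционный состав", "Опыт работы",
   "Конференции", "Доклады на конференциях", "Преподавание", "Образование",
   "Повышение квалификации", "Членство в диссертационных советах",
   "Области научных интересов", "Биография", "Публичные выступления", "Экспертиза"]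

-- One fold over the labels; the output string is built as a List Char (PySem.Chars level) and
-- packed once at the end — 'out = line if not out else out + "\n" + line'.
def render_frequency_py_alt (rows : List (List (String × List (String × Bool)))) : String :=
  let total : Int := rows.length
  String.ofList
    (pvLabelsB.foldl
      (fun (out : List Char) label =>
        let n : Int :=
          (rows.countP (fun r =>
            ((PySem.Dict.ofList ((PySem.Dict.ofList r).getD "presence" [])).get? label).getD false) : Nat)
        let pct : Int := if total = 0 then 0 else pvRoundB (n * 100) total
        let line : List Char :=
          "- **".toList ++ label.toList ++ "** — ".toList ++ PySem.Int.toChars n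
            ++ "/".toList ++ PySem.Int.toChars total ++ " fixtures (".toList
            ++ PySem.Int.toChars pct ++ "%)".toList
        if out = [] then line else out ++ '\n' :: line)
      [])

-- ===== PRECONDITION & SPEC =====
-- Pre_ excludes exactly the rows without a "presence" key, on which Python A raises KeyError.
def Pre_render_frequency_py (rows : List (List (String × List (String × Bool)))) : Prop :=
  (rows.all (fun r => (PySem.Dict.ofList r).contains "presence")) = true
instance (rows : List (List (String × List (String × Bool)))) : Decidable (Pre_render_frequency_py rows) := by unfold Pre_render_frequency_py; infer_instance

def pvWitness_render_frequency_py : (List (List (String × List (String × Bool)))) :=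
  [[("presence", [("x", true)])]]

def Spec_render_frequency_py (rows : List (List (String × List (String × Bool)))) (out : String) : Prop := out = render_frequency_py_alt rows
instance (rows : List (List (String × List (String × Bool)))) (out : String) : Decidable (Spec_render_frequency_py rows out) := by unfold Spec_render_frequency_py; infer_instance

-- ===== CLAIM (what is proved, stated in full; the proofs are below) =====
def Claim_equal_render_frequency_py : Prop := ∀ (rows : List (List (String × List (String × Bool)))), Dom_render_frequency_py rows → Pre_render_frequency_py rows → Spec_render_frequency_py rows (render_frequency_py rows)

-- ===== LEMMAS AND PROOFS =====

-- A's inner loop over one row's presence items adds, at each label, the number of (label, True) items.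
theorem pv_innerFold (ps : List (String × Bool)) (d : PySem.Dict String Int) (label : String) :
    (ps.foldl (fun (d : PySem.Dict String Int) lv =>
        if lv.2 then d.modify lv.1 0 (· + 1) else d) d).getD label 0
      = d.getD label 0 + ((ps.filter (fun p => p.1 == label && p.2)).length : Int) := by
  induction ps generalizing d with
  | nil => simp
  | cons hd tl ih =>
    obtain ⟨l, v⟩ := hd
    cases v with
    | false => simpa using ih d
    | true =>
      simp only [List.foldl_cons, List.filter_cons]
      rw [ih]
      by_cases h : l = label
      · subst h
        simp
        omega
      · simp [PySem.Dict.getD_modify, h, Ne.symm h]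

-- With unique keys, that number is 1 exactly when the dict lookup yields True.
theorem pv_filterLen (ps : List (String × Bool)) (label : String)
    (hnd : (ps.map (·.1)).Nodup) :
    ((ps.filter (fun p => p.1 == label && p.2)).length : Int)
      = if (PySem.Dict.mk ps).get? label = some true then 1 else 0 := by
  induction ps with
  | nil => simp [PySem.Dict.get?]
  | cons hd tl ih =>
    obtain ⟨l, v⟩ := hd
    simp only [List.map_cons, List.nodup_cons] at hnd
    rw [List.filter_cons, PySem.Dict.get?_mk_cons]
    by_cases h : l = label
    · subst h
      have hnil : tl.filter (fun p => p.1 == l && p.2) = [] := by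
        rw [List.filter_eq_nil_iff]
        intro p hp hb
        simp at hb
        exact hnd.1 (hb.1 ▸ List.mem_map_of_mem hp)
      cases v <;> simp [hnil]
    · simpa [h, Ne.symm h] using ih hnd.2

-- the items of a dict have unique keys
theorem pv_nodupPresence (r : List (String × List (String × Bool))) :
    ((pvPresenceA r).items.map (·.1)).Nodup := by
  have h := PySem.Dict.nodup_keys_ofList ((PySem.Dict.ofList r).getD "presence" [])
  simpa [PySem.Dict.keys, pvPresenceA] using h

-- A's whole counting pass read at one label = B's count of rows whose presence maps that label to True.
theorem pv_countLemma (rows : List (List (String × List (String × Bool))))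
    (d : PySem.Dict String Int) (label : String) :
    (rows.foldl
        (fun (freq : PySem.Dict String Int) r =>
          (pvPresenceA r).items.foldl
            (fun (freq : PySem.Dict String Int) lv =>
              if lv.2 then freq.modify lv.1 0 (· + 1) else freq)
            freq)
        d).getD label 0
      = d.getD label 0
        + ((rows.countP (fun r =>
            ((PySem.Dict.ofList ((PySem.Dict.ofList r).getD "presence" [])).get? label).getD false) : Nat) : Int) := by
  induction rows generalizing d with
  | nil => simp
  | cons r tl ih =>
    rw [List.foldl_cons, ih, pv_innerFold, pv_filterLen _ _ (pv_nodupPresence r)]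
    rw [List.countP_cons]
    have hmk : (PySem.Dict.mk (pvPresenceA r).items) = pvPresenceA r := rfl
    rw [hmk]
    by_cases h : (pvPresenceA r).get? label = some true
    · have h' : ((PySem.Dict.ofList ((PySem.Dict.ofList r).getD "presence" [])).get? label).getD false = true := by
        unfold pvPresenceA at h; rw [h]; rfl
      simp [h, h']; omega
    · have h' : ((PySem.Dict.ofList ((PySem.Dict.ofList r).getD "presence" [])).get? label).getD false = false := by
        unfold pvPresenceA at h
        cases hg : (PySem.Dict.ofList ((PySem.Dict.ofList r).getD "presence" [])).get? label with
        | none => simp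
        | some b => cases b <;> simp_all
      simp [h, h']

-- A's pct and B's pct agree (same floor quotient; B's remainder 'num - q*den' IS the Python mod).
theorem pv_pctEq (n total : Int) :
    pvPctA n total = (if total = 0 then 0 else pvRoundB (n * 100) total) := by
  unfold pvPctA pvRoundB
  by_cases h0 : total = 0
  · simp [h0]
  · have hqr := PySem.Int.floordiv_mul_add_mod (n * 100) total
    simp only [h0, if_false]
    have hr : n * 100 - PySem.Int.floordiv (n * 100) total * total
        = PySem.Int.mod (n * 100) total := by omega
    rw [hr]
    split_ifs with h1 h2 h3 h4 h5 <;> first | rfl | (exfalso; omega)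

-- A's formatted line, read as a char list, is B's char-level line (for equal n and pct).
theorem pv_lineEq (label : String) (n total : Int) :
    (pvLineA label n total).toList
      = "- **".toList ++ label.toList ++ "** — ".toList ++ PySem.Int.toChars n
          ++ "/".toList ++ PySem.Int.toChars total ++ " fixtures (".toList
          ++ PySem.Int.toChars (if total = 0 then 0 else pvRoundB (n * 100) total) ++ "%)".toList := by
  rw [← pv_pctEq]
  unfold pvLineA
  simp [PySem.Chars.join, List.intercalate, List.intersperse, PySem.Int.toList_toStr]

-- 'out = line if not out else out + "\n" + line' over a list, from a nonempty accumulator on.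
theorem pv_foldLines (f : String → List Char) (ls : List String) (acc : List Char)
    (hacc : acc ≠ []) :
    ls.foldl (fun out l => if out = [] then f l else out ++ '\n' :: f l) acc
      = acc ++ ls.flatMap (fun l => '\n' :: f l) := by
  induction ls generalizing acc with
  | nil => simp
  | cons l tl ih =>
    simp only [List.foldl_cons, List.flatMap_cons, if_neg hacc]
    rw [ih _ (by simp)]
    simp

-- "\n".join as a char list
theorem pv_joinNL (cs : List Char) (css : List (List Char)) :
    PySem.Chars.join ['\n'] (cs :: css) = cs ++ css.flatMap (fun c => '\n' :: c) := by
  induction css generalizing cs with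
  | nil => simp [PySem.Chars.join, List.intercalate]
  | cons d ds ih => rw [PySem.Chars.join_cons_cons, ih]; simp

-- "\n".join(lines) where each line is A's pvLineA at some count cnt(label), versus B's single
-- accumulating fold over the same labels, for a nonempty label list.
theorem pv_core (cnt : String → Int) (T : Int) (l : String) (ls : List String) :
    (PySem.Str.join "\n" ((l :: ls).map (fun lab => pvLineA lab (cnt lab) T))).toList
      = (l :: ls).foldl
          (fun (out : List Char) label =>
            let n : Int := cnt label
            let pct : Int := if T = 0 then 0 else pvRoundB (n * 100) T
            let line : List Char :=
              "- **".toList ++ label.toList ++ "** — ".toList ++ PySem.Int.toChars n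
                ++ "/".toList ++ PySem.Int.toChars T ++ " fixtures (".toList
                ++ PySem.Int.toChars pct ++ "%)".toList
            if out = [] then line else out ++ '\n' :: line) [] := by
  have hjoin : (PySem.Str.join "\n" ((l :: ls).map (fun lab => pvLineA lab (cnt lab) T))).toList
      = PySem.Chars.join ['\n'] (((l :: ls).map (fun lab => pvLineA lab (cnt lab) T)).map String.toList) := by
    simp
  rw [hjoin, List.map_map, List.map_cons, pv_joinNL]
  have hne : ∀ label : String, ∀ n pct : Int,
      "- **".toList ++ label.toList ++ "** — ".toList ++ PySem.Int.toChars n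
        ++ "/".toList ++ PySem.Int.toChars T ++ " fixtures (".toList
        ++ PySem.Int.toChars pct ++ "%)".toList ≠ [] := by
    intro label n pct
    simp
  simp only [List.foldl_cons]
  simp only [if_true]
  rw [pv_foldLines _ _ _ (hne l (cnt l) _), Function.comp_def]
  simp [pv_lineEq, List.flatMap_map]

-- ===== VERDICT (by name: the statement is the Claim_ definition above) =====
set_option maxHeartbeats 1000000 in
theorem render_frequency_py_spec : Claim_equal_render_frequency_py := by
  intro rows _ _
  simp only [Spec_render_frequency_py, render_frequency_py, render_frequency_py_alt]
  rw [PySem.List.foldl_append_singleton_eq_map]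
  simp only [List.nil_append]
  have hcnt : ∀ label : String,
      (rows.foldl
          (fun (freq : PySem.Dict String Int) r =>
            (pvPresenceA r).items.foldl
              (fun (freq : PySem.Dict String Int) lv =>
                if lv.2 then freq.modify lv.1 0 (· + 1) else freq)
              freq)
          PySem.Dict.empty).getD label 0
        = ((rows.countP (fun r =>
            ((PySem.Dict.ofList ((PySem.Dict.ofList r).getD "presence" [])).get? label).getD false) : Nat) : Int) := by
    intro label
    rw [pv_countLemma]
    simp
  have hmap : pvSectionLabelsA.map (fun label => pvLineA label
        ((rows.foldl
          (fun (freq : PySem.Dict String Int) r =>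
            (pvPresenceA r).items.foldl
              (fun (freq : PySem.Dict String Int) lv =>
                if lv.2 then freq.modify lv.1 0 (· + 1) else freq)
              freq)
          PySem.Dict.empty).getD label 0) (rows.length : Int))
      = pvSectionLabelsA.map (fun label => pvLineA label
          ((rows.countP (fun r =>
            ((PySem.Dict.ofList ((PySem.Dict.ofList r).getD "presence" [])).get? label).getD false) : Nat) : Int)
          (rows.length : Int)) := by
    apply List.map_congr_left
    intro label _
    rw [hcnt]
  rw [hmap]
  refine Eq.trans String.ofList_toList.symm ?_
  exact congrArg String.ofList (pv_core
    (fun label => ((rows.countP (fun r =>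
      ((PySem.Dict.ofList ((PySem.Dict.ofList r).getD "presence" [])).get? label).getD false) : Nat) : Int))
    (rows.length : Int) "Публикации"
    ["Достижения и поощрения", "Награды", "Гранты", "Патенты",
     "Руководство студенческими работами", "Редакционный состав", "Опыт работы",
     "Конференции", "Доклады на конференциях", "Преподавание", "Образование",
     "Повышение квалификации", "Членство в диссертационных советах",
     "Области научных интересов", "Биография", "Публичные выступления", "Экспертиза"])
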